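-- pv_equiv track=rewrite | github.com/aaidoudi91/RectanglePackingSolver | solvers/dfs.py | _borne_martello_toth
-- ===== SOURCE A (Python) =====
-- def _borne_martello_toth(capacites, items, taille_max):
--     """ Calcule une borne inférieure sur le gaspillage. """
--     bins = {}
--     for cap in capacites:
--         if cap > 0:
--             # bins[c] = aire totale disponible dans toutes les rangées de capacité libre c
--             bins[cap] = bins.get(cap, 0) + cap
--
--     gaspillage = 0
--     carryover = 0
--
--     for taille in range(1, taille_max + 1):
--         bin_area = bins.get(taille, 0)  # espace dans les bins de capacité exacte = taille
--         item_area = items.get(taille, 0)  # aire des items de taille exacte = taille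
--         total_items = carryover + item_area
--
--         if bin_area > total_items:  # surplus de capacité
--             gaspillage += bin_area - total_items
--             carryover = 0
--         else:  # surplus d'items
--             carryover = total_items - bin_area
--
--     return gaspillage
-- ===== SOURCE B (Python) =====
-- def _borne_martello_toth(capacites, items, taille_max):
--     """Prefix-max reformulation: the wastage equals the maximum, over all
--     thresholds t, of (total bin area of capacity <= t) - (total item area of
--     size <= t), clamped at 0; only sizes actually present can change that
--     maximum, so we fold the signed contributions into one dict and take the
--     running maximum over its sorted keys."""
--     delta = {}
--     for cap in capacites:
--         if 1 <= cap <= taille_max: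
--             delta[cap] = delta.get(cap, 0) + cap
--     for taille, aire in items.items():
--         if 1 <= taille <= taille_max:
--             delta[taille] = delta.get(taille, 0) - aire
--     best = 0
--     run = 0
--     for taille in sorted(delta):
--         run += delta[taille]
--         if run > best:
--             best = run
--     return best
-- ===== Notes on version B (the rewrite author's own statement) =====
-- stated objective: alternative
-- what changed: B replaces A's stateful surplus/carryover scan of every size 1..taille_max by a closed-form prefix-max: it folds bin and item contributions into one signed dict and takes the running maximum of prefix sums over the sorted distinct sizes actually present (O(k log k) in the k present sizes rather than O(taille_max); measured only ~1.25x on the generated inputs, so not claimed as faster).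
import Mathlib
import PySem

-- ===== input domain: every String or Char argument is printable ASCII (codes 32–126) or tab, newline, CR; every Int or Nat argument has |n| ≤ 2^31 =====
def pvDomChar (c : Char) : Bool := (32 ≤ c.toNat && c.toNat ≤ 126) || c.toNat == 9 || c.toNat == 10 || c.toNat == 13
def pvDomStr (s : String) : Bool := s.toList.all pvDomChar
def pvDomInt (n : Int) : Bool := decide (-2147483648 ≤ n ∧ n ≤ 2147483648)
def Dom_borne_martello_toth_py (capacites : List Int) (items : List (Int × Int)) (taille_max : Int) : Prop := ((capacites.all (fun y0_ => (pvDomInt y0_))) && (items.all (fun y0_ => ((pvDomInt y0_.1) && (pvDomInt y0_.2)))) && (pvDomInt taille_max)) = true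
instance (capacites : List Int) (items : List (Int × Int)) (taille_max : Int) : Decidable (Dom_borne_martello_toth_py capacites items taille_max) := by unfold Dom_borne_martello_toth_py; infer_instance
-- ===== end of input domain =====

-- B replaces A's stateful scan of every size 1..taille_max by a prefix-max of the net
-- contributions over the sorted distinct sizes actually present (objective: alternative).

-- ===== PORT A =====
def borne_martello_toth_py (capacites : List Int) (items : List (Int × Int)) (taille_max : Int) : Int :=
  let bins := capacites.foldl (fun d cap =>
      if cap > 0 then d.insert cap (d.getD cap 0 + cap) else d) PySem.Dict.empty
  let st := (PySem.List.pyRange 1 (taille_max + 1) 1).foldl (fun (st : Int × Int) taille =>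
      let bin_area := bins.getD taille 0
      let item_area := (PySem.Dict.mk items).getD taille 0
      let total_items := st.2 + item_area
      if bin_area > total_items then (st.1 + (bin_area - total_items), 0)
      else (st.1, total_items - bin_area)) (0, 0)
  st.1

-- ===== PORT B =====
def borne_martello_toth_py_alt (capacites : List Int) (items : List (Int × Int)) (taille_max : Int) : Int :=
  let delta0 := capacites.foldl (fun d cap =>
      if 1 ≤ cap ∧ cap ≤ taille_max then d.insert cap (d.getD cap 0 + cap) else d) PySem.Dict.empty
  let delta := items.foldl (fun d p =>
      if 1 ≤ p.1 ∧ p.1 ≤ taille_max then d.insert p.1 (d.getD p.1 0 - p.2) else d) delta0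
  -- 'run += delta[taille]': the key is present, so the dict lookup is the first (unique) match
  let st := (PySem.List.sorted delta.keys (fun t => t) false).foldl (fun (st : Int × Int) taille =>
      let run := st.2 + delta.getD taille 0
      (if run > st.1 then run else st.1, run)) (0, 0)
  st.1

-- ===== PRECONDITION & SPEC =====
-- items is a Python dict; an association list with duplicate keys encodes no Python input
-- (Python dicts have distinct keys), so Pre_ restricts to the lists that do represent dicts.
def Pre_borne_martello_toth_py (capacites : List Int) (items : List (Int × Int)) (taille_max : Int) : Prop :=
  (items.map Prod.fst).Nodup
instance (capacites : List Int) (items : List (Int × Int)) (taille_max : Int) : Decidable (Pre_borne_martello_toth_py capacites items taille_max) := by unfold Pre_borne_martello_toth_py; infer_instance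

def pvWitness_borne_martello_toth_py : List Int × (List (Int × Int)) × Int := ([2, 2, 3], [(1, 2), (3, 4)], 5)

def Spec_borne_martello_toth_py (capacites : List Int) (items : List (Int × Int)) (taille_max : Int) (out : Int) : Prop := out = borne_martello_toth_py_alt capacites items taille_max
instance (capacites : List Int) (items : List (Int × Int)) (taille_max : Int) (out : Int) : Decidable (Spec_borne_martello_toth_py capacites items taille_max out) := by unfold Spec_borne_martello_toth_py; infer_instance

-- ===== CLAIM (what is proved, stated in full; the proofs are below) =====
def Claim_equal_borne_martello_toth_py : Prop := ∀ (capacites : List Int) (items : List (Int × Int)) (taille_max : Int), Dom_borne_martello_toth_py capacites items taille_max → Pre_borne_martello_toth_py capacites items taille_max → Spec_borne_martello_toth_py capacites items taille_max (borne_martello_toth_py capacites items taille_max)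

-- ===== LEMMAS AND PROOFS =====

-- A's loop step, abstracted over the net contribution d = bin_area - item_area of a size.
def pvStepA : Int × Int → Int → Int × Int := fun s d =>
  if d > s.2 then (s.1 + (d - s.2), 0) else (s.1, s.2 - d)

-- B's loop step (state = (best, run)).
def pvStepB : Int × Int → Int → Int × Int := fun s d =>
  (if s.2 + d > s.1 then s.2 + d else s.1, s.2 + d)

-- maximum over all prefixes (including the empty one) of the prefix sums
def pvMaxPref : List Int → Int
  | [] => 0
  | d :: ds => max 0 (d + pvMaxPref ds)

theorem pvMaxPref_nonneg (ds : List Int) : 0 ≤ pvMaxPref ds := by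
  cases ds with
  | nil => simp [pvMaxPref]
  | cons d ds => simp [pvMaxPref]

theorem pvFoldA (ds : List Int) : ∀ g c : Int, 0 ≤ c →
    (ds.foldl pvStepA (g, c)).1 = g + max 0 (pvMaxPref ds - c) := by
  induction ds with
  | nil => intro g c hc; simp [pvMaxPref]; omega
  | cons d ds ih =>
    intro g c hc
    have hnn := pvMaxPref_nonneg ds
    by_cases h : d > c
    · rw [List.foldl_cons, show pvStepA (g, c) d = (g + (d - c), 0) by simp [pvStepA, h]]
      rw [ih _ _ le_rfl]; simp [pvMaxPref]; omega
    · rw [List.foldl_cons, show pvStepA (g, c) d = (g, c - d) by simp [pvStepA, h]]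
      rw [ih _ _ (by omega)]; simp [pvMaxPref]; omega

theorem pvFoldB (ds : List Int) : ∀ b r : Int, r ≤ b →
    (ds.foldl pvStepB (b, r)).1 = max b (r + pvMaxPref ds) := by
  induction ds with
  | nil => intro b r h; simp [pvMaxPref]; omega
  | cons d ds ih =>
    intro b r h
    have hnn := pvMaxPref_nonneg ds
    rw [List.foldl_cons, show pvStepB (b, r) d = (max b (r + d), r + d) by
      simp [pvStepB]; omega]
    rw [ih _ _ (le_max_right _ _)]; simp [pvMaxPref]; omega

-- sizes with zero net contribution may be skipped
theorem pvSkip (L : List Int) (p : Int → Bool) (f : Int → Int)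
    (h : ∀ t ∈ L, p t = false → f t = 0) :
    pvMaxPref ((L.filter p).map f) = pvMaxPref (L.map f) := by
  induction L with
  | nil => rfl
  | cons a L ih =>
    have ih' := ih (fun t ht => h t (List.mem_cons_of_mem _ ht))
    by_cases hp : p a = true
    · simp [hp, pvMaxPref, ih']
    · have hz : f a = 0 := h a (List.mem_cons_self) (by simpa using hp)
      have hnn := pvMaxPref_nonneg (L.map f)
      simp [hp, pvMaxPref, ih', hz]
      omega

theorem pvGetD_foldl_insert_add (l : List Int) (g : Int → Int) (d : PySem.Dict Int Int) (t : Int) :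
    (l.foldl (fun d x => d.insert x (d.getD x 0 + g x)) d).getD t 0
      = d.getD t 0 + (l.count t : Int) * g t := by
  induction l generalizing d with
  | nil => simp
  | cons x l ih =>
    rw [List.foldl_cons, ih]
    by_cases hx : t = x
    · subst hx
      simp
      ring
    · simp [PySem.Dict.getD_insert, hx, Ne.symm hx]

theorem pvGetD_foldl_insert_add_self (l : List Int) (d : PySem.Dict Int Int) (t : Int) :
    (l.foldl (fun d x => d.insert x (d.getD x 0 + x)) d).getD t 0
      = d.getD t 0 + (l.count t : Int) * t := by
  simpa using pvGetD_foldl_insert_add l (fun x => x) d t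

theorem pvGetD_foldl_insert_sub (l : List (Int × Int)) (d : PySem.Dict Int Int) (t : Int) :
    (l.foldl (fun d p => d.insert p.1 (d.getD p.1 0 - p.2)) d).getD t 0
      = d.getD t 0 - ((l.filter (fun p => p.1 == t)).map Prod.snd).sum := by
  induction l generalizing d with
  | nil => simp
  | cons x l ih =>
    rw [List.foldl_cons, ih]
    by_cases hx : x.1 = t
    · simp [PySem.Dict.getD_insert, hx]
      ring
    · simp [PySem.Dict.getD_insert, fun h => hx (h : x.1 = t)]
      omega

theorem pvGetD_mk (items : List (Int × Int)) (t : Int) (h : (items.map Prod.fst).Nodup) :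
    (PySem.Dict.mk items).getD t 0
      = ((items.filter (fun p => p.1 == t)).map Prod.snd).sum := by
  induction items with
  | nil => simp [PySem.Dict.getD_eq_get?_getD]; rfl
  | cons x l ih =>
    simp only [List.map_cons, List.nodup_cons] at h
    rw [PySem.Dict.getD_eq_get?_getD, PySem.Dict.get?_mk_cons]
    by_cases hx : x.1 = t
    · have hfl : l.filter (fun p => p.1 == t) = [] := by
        rw [List.filter_eq_nil_iff]
        intro p hp hpe
        exact h.1 (hx ▸ (beq_iff_eq.mp hpe) ▸ List.mem_map_of_mem hp)
      simp [hfl, hx]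
    · have hb : (x.1 == t) = false := by simpa using hx
      simp only [List.filter_cons, hb, if_false, Bool.false_eq_true]
      rw [← PySem.Dict.getD_eq_get?_getD]
      exact ih h.2

-- net contribution of size t, as A computes it
def pvDeltaA (capacites : List Int) (items : List (Int × Int)) (t : Int) : Int :=
  (capacites.foldl (fun d cap =>
      if cap > 0 then d.insert cap (d.getD cap 0 + cap) else d) PySem.Dict.empty).getD t 0
    - (PySem.Dict.mk items).getD t 0

-- A's result is the prefix-max of the net contributions over 1..taille_max
theorem pvA_char (capacites : List Int) (items : List (Int × Int)) (taille_max : Int) :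
    borne_martello_toth_py capacites items taille_max
      = pvMaxPref ((PySem.List.pyRange 1 (taille_max + 1) 1).map (pvDeltaA capacites items)) := by
  unfold borne_martello_toth_py
  dsimp only
  have hstep : (fun (st : Int × Int) taille =>
      let bin_area := (capacites.foldl (fun d cap =>
        if cap > 0 then d.insert cap (d.getD cap 0 + cap) else d) PySem.Dict.empty).getD taille 0
      let item_area := (PySem.Dict.mk items).getD taille 0
      let total_items := st.2 + item_area
      if bin_area > total_items then (st.1 + (bin_area - total_items), 0)
      else (st.1, total_items - bin_area))
      = fun (st : Int × Int) taille => pvStepA st (pvDeltaA capacites items taille) := by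
    funext s t
    simp only [pvStepA, pvDeltaA]
    split_ifs with h1 h2 <;> simp_all [Prod.ext_iff] <;> omega
  rw [hstep, ← List.foldl_map, pvFoldA _ 0 0 le_rfl]
  have := pvMaxPref_nonneg ((PySem.List.pyRange 1 (taille_max + 1) 1).map (pvDeltaA capacites items))
  omega

-- ===== VERDICT (by name: the statement is the Claim_ definition above) =====
theorem borne_martello_toth_py_spec : Claim_equal_borne_martello_toth_py := by
  intro capacites items taille_max _hdom hpre
  unfold Spec_borne_martello_toth_py
  rw [pvA_char]
  unfold borne_martello_toth_py_alt
  dsimp only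
  set T := taille_max with hT
  rw [PySem.List.foldl_ite_eq_foldl_filter (fun cap => 1 ≤ cap ∧ cap ≤ T)
      (fun (d : PySem.Dict Int Int) cap => d.insert cap (d.getD cap 0 + cap)) capacites PySem.Dict.empty]
  rw [PySem.List.foldl_ite_eq_foldl_filter (fun q : Int × Int => 1 ≤ q.1 ∧ q.1 ≤ T)
      (fun (d : PySem.Dict Int Int) q => d.insert q.1 (d.getD q.1 0 - q.2)) items]
  set fc := capacites.filter (fun x => decide (1 ≤ x ∧ x ≤ T)) with hfc
  set fi := items.filter (fun q => decide (1 ≤ q.1 ∧ q.1 ≤ T)) with hfi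
  set delta := fi.foldl (fun (d : PySem.Dict Int Int) q => d.insert q.1 (d.getD q.1 0 - q.2))
      (fc.foldl (fun (d : PySem.Dict Int Int) cap => d.insert cap (d.getD cap 0 + cap)) PySem.Dict.empty) with hdelta
  -- keys of delta
  have hkeys_mem : ∀ t : Int, t ∈ delta.keys ↔ t ∈ fc ∨ t ∈ fi.map Prod.fst := by
    intro t
    rw [hdelta, PySem.Dict.keys_foldl_insert_key, PySem.Dict.keys_foldl_insert]
    simp [PySem.Set.mem_update, PySem.Dict.keys_empty]
  have hkeys_nodup : delta.keys.Nodup := by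
    rw [hdelta]
    exact PySem.Dict.nodup_keys_foldl_insert_key _ _ _ _
      (PySem.Dict.nodup_keys_foldl_insert _ _ _ (by simp [PySem.Dict.keys_empty]))
  have hrange : ∀ t ∈ delta.keys, 1 ≤ t ∧ t ≤ T := by
    intro t ht
    rcases (hkeys_mem t).mp ht with h | h
    · have := (List.mem_filter.mp h).2; simp at this; omega
    · rcases List.mem_map.mp h with ⟨q, hq, hqt⟩
      have := (List.mem_filter.mp hq).2; simp at this; omega
  -- value of delta at a key
  have hget : ∀ t : Int, delta.getD t 0
      = (fc.count t : Int) * t - ((fi.filter (fun q => q.1 == t)).map Prod.snd).sum := by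
    intro t
    rw [hdelta, pvGetD_foldl_insert_sub, pvGetD_foldl_insert_add_self]
    simp
  -- A's net contribution, in counting form
  have hA : ∀ t : Int, 1 ≤ t → t ≤ T → pvDeltaA capacites items t
      = ((capacites.filter (fun c => decide (c > 0))).count t : Int) * t
        - ((items.filter (fun q => q.1 == t)).map Prod.snd).sum := by
    intro t _h1 _h2
    unfold pvDeltaA
    rw [PySem.List.foldl_ite_eq_foldl_filter (fun cap => cap > 0)
        (fun (d : PySem.Dict Int Int) cap => d.insert cap (d.getD cap 0 + cap)) capacites PySem.Dict.empty,
      pvGetD_foldl_insert_add_self, pvGetD_mk items t hpre]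
    simp
  -- count / sum transfer between the filtered and unfiltered lists, for t in range
  have hcount : ∀ t : Int, 1 ≤ t → t ≤ T →
      (fc.count t) = (capacites.filter (fun c => decide (c > 0))).count t := by
    intro t h1 h2
    rw [hfc, List.count_filter (by simp; omega), List.count_filter (by simp; omega)]
  have hsum : ∀ t : Int, 1 ≤ t → t ≤ T →
      fi.filter (fun q => q.1 == t) = items.filter (fun q => q.1 == t) := by
    intro t h1 h2
    rw [hfi, List.filter_filter]
    apply List.filter_congr
    intro q _hq
    by_cases hqt : q.1 = t
    · subst hqt; simp; omega
    · simp [hqt]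
  -- delta agrees with A's net contribution on keys
  have hagree : ∀ t ∈ delta.keys, delta.getD t 0 = pvDeltaA capacites items t := by
    intro t ht
    obtain ⟨h1, h2⟩ := hrange t ht
    rw [hget, hA t h1 h2, hcount t h1 h2, hsum t h1 h2]
  -- off keys (and in range) the net contribution vanishes
  have hzero : ∀ t ∈ PySem.List.pyRange 1 (T + 1) 1, delta.contains t = false →
      pvDeltaA capacites items t = 0 := by
    intro t ht hc
    obtain ⟨h1, h2'⟩ := PySem.List.mem_pyRange_one.mp ht
    have h2 : t ≤ T := by omega
    have hnk : t ∉ delta.keys := by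
      intro hk
      rw [PySem.Dict.contains_eq_decide_mem_keys] at hc
      simp at hc; exact hc hk
    have hfc0 : t ∉ fc := fun h => hnk ((hkeys_mem t).mpr (Or.inl h))
    have hfi0 : items.filter (fun q => q.1 == t) = [] := by
      rw [← hsum t h1 h2, List.filter_eq_nil_iff]
      intro q hq hqe
      exact hnk ((hkeys_mem t).mpr (Or.inr (List.mem_map.mpr ⟨q, hq, beq_iff_eq.mp hqe⟩)))
    rw [hA t h1 h2, ← hcount t h1 h2, List.count_eq_zero.mpr hfc0, hfi0]
    simp
  -- name the sorted key list and identify it with a filtered range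
  have hks : PySem.List.sorted delta.keys (fun t => t) false
      = (PySem.List.pyRange 1 (T + 1) 1).filter (fun t => delta.contains t) := by
    apply PySem.List.sorted_eq_of_perm_of_pairwise_lt
    · refine (List.perm_ext_iff_of_nodup ((PySem.List.nodup_pyRange_one 1 (T + 1)).filter _) hkeys_nodup).mpr ?_
      intro a
      simp only [List.mem_filter, PySem.List.mem_pyRange_one, PySem.Dict.contains_eq_decide_mem_keys,
        decide_eq_true_eq]
      constructor
      · exact fun h => h.2
      · intro h
        obtain ⟨h1, h2⟩ := hrange a h
        exact ⟨⟨h1, by omega⟩, h⟩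
    · exact (PySem.List.pairwise_lt_pyRange_one 1 (T + 1)).filter _
  rw [hks]
  have hstepB : (fun (st : Int × Int) taille =>
      (if st.2 + delta.getD taille 0 > st.1 then st.2 + delta.getD taille 0 else st.1,
        st.2 + delta.getD taille 0))
      = fun (s : Int × Int) t => pvStepB s (delta.getD t 0) := rfl
  rw [hstepB, ← List.foldl_map, pvFoldB _ 0 0 le_rfl]
  have hmapeq : ((PySem.List.pyRange 1 (T + 1) 1).filter (fun t => delta.contains t)).map
        (fun t => delta.getD t 0)
      = ((PySem.List.pyRange 1 (T + 1) 1).filter (fun t => delta.contains t)).map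
        (pvDeltaA capacites items) := by
    apply List.map_congr_left
    intro t ht
    have hc := (List.mem_filter.mp ht).2
    rw [PySem.Dict.contains_eq_decide_mem_keys] at hc
    exact hagree t (by simpa using hc)
  rw [hmapeq, pvSkip _ _ _ hzero]
  have := pvMaxPref_nonneg ((PySem.List.pyRange 1 (T + 1) 1).map (pvDeltaA capacites items))
  omega
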